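-- pv_equiv track=rewrite | github.com/tonydou612/NRTTreescan | step1_generate.py | make_icd10_codes
-- ===== SOURCE A (Python) =====
-- from typing import List, Tuple, Optional
--
-- def make_icd10_codes(L: int) -> List[str]:
--     """Create L synthetic ICD-10 leaf-level codes like A00.0, A00.1, ..."""
--     letters = [chr(c) for c in range(ord("A"), ord("Z") + 1)]
--     codes = []
--     major = 0
--     minor = 0
--     li = 0
--     while len(codes) < L:
--         letter = letters[li % len(letters)]
--         codes.append(f"{letter}{major:02d}.{minor}")
--         minor += 1
--         if minor > 9:
--             minor = 0
--             major += 1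
--         if major > 99:
--             major = 0
--             li += 1
--     return codes[:L]
-- ===== SOURCE B (Python) =====
-- from typing import List
--
-- def make_icd10_codes(L: int) -> List[str]:
--     """Create L synthetic ICD-10 leaf-level codes like A00.0, A00.1, ..."""
--     return [
--         f"{chr(ord('A') + (i // 1000) % 26)}{(i // 10) % 100:02d}.{i % 10}"
--         for i in range(L)
--     ]
-- ===== Notes on version B (the rewrite author's own statement) =====
-- stated objective: simpler
-- what changed: Replaces the while-loop with three stateful carry counters (minor->major->letter) by a single comprehension that computes each code directly from its index with division and remainder for the minor digit, the major pair and the letter position.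
import Mathlib
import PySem

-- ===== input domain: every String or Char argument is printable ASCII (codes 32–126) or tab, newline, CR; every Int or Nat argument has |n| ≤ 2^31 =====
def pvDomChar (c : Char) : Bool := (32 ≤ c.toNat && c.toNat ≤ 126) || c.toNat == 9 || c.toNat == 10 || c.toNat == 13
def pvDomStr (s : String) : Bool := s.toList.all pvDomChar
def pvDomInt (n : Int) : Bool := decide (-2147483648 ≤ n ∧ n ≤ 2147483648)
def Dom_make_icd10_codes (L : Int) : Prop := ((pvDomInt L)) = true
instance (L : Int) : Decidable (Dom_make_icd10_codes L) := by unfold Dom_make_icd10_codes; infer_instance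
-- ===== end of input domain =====

-- B replaces A's stateful carry loop by a comprehension computing each code from its index (objective: simpler).

-- ===== PORT A =====
-- letters = [chr(c) for c in range(ord("A"), ord("Z") + 1)]
def pvLettersA : List String := (PySem.List.pyRange 65 91 1).map (fun c => String.ofList [Char.ofNat c.toNat])

-- f"{major:02d}"; exact for 0 ≤ major < 100 (the only values the loop produces)
def pvPad2A (m : Int) : String := if m < 10 then "0" ++ PySem.Int.toStr m else PySem.Int.toStr m

-- the while-loop of A, step for step (the two if-blocks update minor/major/li in order);
-- the loop appends one code per iteration, so fuel = max(L, 0) iterations is exactly enough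
def pvLoopA (L : Int) : Nat → List String → Int → Int → Int → List String
  | 0, codes, _, _, _ => codes
  | fuel+1, codes, major, minor, li =>
    if (codes.length : Int) < L then
      -- letters[li % len(letters)]: the index is always in range (0 ≤ li here), so getD is never taken
      let letter := (PySem.List.pyGet? pvLettersA (PySem.Int.mod li (pvLettersA.length : Int))).getD ""
      let codes' := codes ++ [letter ++ pvPad2A major ++ "." ++ PySem.Int.toStr minor]
      let minor1 := minor + 1
      let minor2 := if minor1 > 9 then 0 else minor1
      let major1 := if minor1 > 9 then major + 1 else major
      let major2 := if major1 > 99 then 0 else major1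
      let li1 := if major1 > 99 then li + 1 else li
      pvLoopA L fuel codes' major2 minor2 li1
    else codes

def make_icd10_codes (L : Int) : List String :=
  PySem.List.slice (pvLoopA L L.toNat [] 0 0 0) none (some L)   -- codes[:L]

-- ===== PORT B =====
-- f"{...:02d}" as written in Source B's f-string; exact for the nonnegative values produced
def pvPad2B (m : Int) : String := if m < 10 then "0" ++ PySem.Int.toStr m else PySem.Int.toStr m

-- f"{chr(ord('A') + (i // 1000) % 26)}{(i // 10) % 100:02d}.{i % 10}"
def pvCodeB (i : Int) : String :=
  String.ofList [Char.ofNat (65 + (PySem.Int.mod (PySem.Int.floordiv i 1000) 26)).toNat]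
    ++ pvPad2B (PySem.Int.mod (PySem.Int.floordiv i 10) 100)
    ++ "." ++ PySem.Int.toStr (PySem.Int.mod i 10)

def make_icd10_codes_alt (L : Int) : List String :=
  (PySem.List.pyRange 0 L 1).map pvCodeB

-- ===== PRECONDITION & SPEC =====
def Spec_make_icd10_codes (L : Int) (out : List String) : Prop := out = make_icd10_codes_alt L
instance (L : Int) (out : List String) : Decidable (Spec_make_icd10_codes L out) := by unfold Spec_make_icd10_codes; infer_instance

-- ===== CLAIM (what is proved, stated in full; the proofs are below) =====
def Claim_equal_make_icd10_codes : Prop := ∀ (L : Int), Dom_make_icd10_codes L → Spec_make_icd10_codes L (make_icd10_codes L)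

-- ===== LEMMAS AND PROOFS =====

lemma pvLetters_get (k : Nat) (hk : k < 26) :
    (PySem.List.pyGet? pvLettersA (k : Int)).getD "" = String.ofList [Char.ofNat (65 + k)] := by
  have hC : ((65:Int) + (k:Int)).toNat = 65 + k := by omega
  rw [PySem.List.pyGet?_natCast]
  simp [pvLettersA, PySem.List.pyRange_one, hk, hC]

-- the code string A emits at index n equals pvCodeB n
lemma pvCode_eq (n : Nat) :
    ((PySem.List.pyGet? pvLettersA (PySem.Int.mod ((n / 1000 : Nat) : Int) (pvLettersA.length : Int))).getD ""
      ++ pvPad2A ((n / 10 % 100 : Nat) : Int) ++ "." ++ PySem.Int.toStr ((n % 10 : Nat) : Int))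
    = pvCodeB (n : Int) := by
  have hlen : (pvLettersA.length : Int) = ((26 : Nat) : Int) := by decide
  rw [hlen, PySem.Int.mod_natCast, pvLetters_get (n / 1000 % 26) (Nat.mod_lt _ (by omega))]
  unfold pvCodeB
  rw [show (1000 : Int) = ((1000 : Nat) : Int) from rfl, show (26 : Int) = ((26 : Nat) : Int) from rfl,
      show (10 : Int) = ((10 : Nat) : Int) from rfl, show (100 : Int) = ((100 : Nat) : Int) from rfl,
      PySem.Int.floordiv_natCast, PySem.Int.mod_natCast, PySem.Int.floordiv_natCast,
      PySem.Int.mod_natCast, PySem.Int.mod_natCast]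
  rfl

-- the loop, started from the state reached after n emitted codes, emits the remaining fuel codes by index
lemma pvLoopA_eq (fuel : Nat) : ∀ (L : Int) (codes : List String) (n : Nat),
    codes.length = n → (L - n).toNat = fuel →
    pvLoopA L fuel codes ((n / 10 % 100 : Nat) : Int) ((n % 10 : Nat) : Int) ((n / 1000 : Nat) : Int)
      = codes ++ (List.range fuel).map (fun k => pvCodeB ((n + k : Nat) : Int)) := by
  induction fuel with
  | zero =>
    intro L codes n hlen hfuel
    simp [pvLoopA]
  | succ fuel ih =>
    intro L codes n hlen hfuel
    rw [pvLoopA, if_pos (by omega)]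
    simp only []
    rw [pvCode_eq n]
    have hrec : ∀ (maj mi l : Int),
        maj = (((n+1) / 10 % 100 : Nat) : Int) → mi = (((n+1) % 10 : Nat) : Int) →
        l = (((n+1) / 1000 : Nat) : Int) →
        pvLoopA L fuel (codes ++ [pvCodeB (n : Int)]) maj mi l
          = codes ++ (List.range (fuel+1)).map (fun k => pvCodeB ((n + k : Nat) : Int)) := by
      intro maj mi l h1 h2 h3
      subst h1; subst h2; subst h3
      have hf2 : (L - (((n+1) : Nat) : Int)).toNat = fuel := by omega
      rw [ih L _ (n+1) (by simp [hlen]) hf2]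
      have hsplit : (List.range (fuel+1)).map (fun k => pvCodeB ((n + k : Nat) : Int))
          = pvCodeB ((n : Nat) : Int) :: (List.range fuel).map (fun k => pvCodeB (((n+1) + k : Nat) : Int)) := by
        rw [List.range_succ_eq_map, List.map_cons, List.map_map]
        refine congrArg₂ _ (by simp) ?_
        refine congrArg (fun f => List.map f (List.range fuel)) ?_
        funext k
        simp only [Function.comp_apply]
        exact congrArg _ (by omega)
      rw [hsplit]
      simp
    apply hrec <;> (split_ifs <;> omega)

-- ===== VERDICT (by name: the statement is the Claim_ definition above) =====
theorem make_icd10_codes_spec : Claim_equal_make_icd10_codes := by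
  intro L _
  unfold Spec_make_icd10_codes make_icd10_codes make_icd10_codes_alt
  have h0 := pvLoopA_eq L.toNat L [] 0 rfl (by omega)
  simp only [Nat.zero_div, Nat.zero_mod, Nat.cast_zero, Nat.zero_add, List.nil_append] at h0
  rw [h0]
  by_cases hL : L ≤ 0
  · have ht : L.toNat = 0 := by omega
    rw [ht, PySem.List.pyRange_one_eq_nil hL]
    simp only [List.range_zero, List.map_nil]
    simp [PySem.List.slice, PySem.List.clampIdx]
  · have hL' : 0 ≤ L := by omega
    rw [PySem.List.slice_to _ hL', List.take_of_length_le (by simp),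
        PySem.List.pyRange_one]
    simp only [Int.sub_zero, List.map_map]
    refine congrArg (fun f => List.map f (List.range L.toNat)) ?_
    funext k
    simp [Function.comp]
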